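-- pv_equiv track=rewrite | github.com/KAXUN01/Heal-X-Bot | monitoring/server/centralized_logger.py | _detect_log_level
-- ===== SOURCE A (Python) =====
-- def _detect_log_level(message: str) -> str:
--     """
--     Auto-detect log level from message content
--     """
--     msg_lower = message.lower()
--     if any(keyword in msg_lower for keyword in ['critical', 'fatal', 'emergency', 'panic']):
--         return 'CRITICAL'
--     elif any(keyword in msg_lower for keyword in ['error', 'err', 'failed', 'failure']):
--         return 'ERROR'
--     elif any(keyword in msg_lower for keyword in ['warn', 'warning', 'caution']):
--         return 'WARNING'
--     elif any(keyword in msg_lower for keyword in ['debug', 'dbg']):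
--         return 'DEBUG'
--     else:
--         return 'INFO'
-- ===== SOURCE B (Python) =====
-- _KEYWORDS = [
--     ('critical', 0), ('fatal', 0), ('emergency', 0), ('panic', 0),
--     ('err', 1), ('failed', 1), ('failure', 1),
--     ('warn', 2), ('caution', 2),
--     ('debug', 3), ('dbg', 3),
-- ]
-- _LEVEL_NAMES = ['CRITICAL', 'ERROR', 'WARNING', 'DEBUG', 'INFO']
--
--
-- def _detect_log_level(message: str) -> str:
--     m = message.lower()
--     best = 4
--     for i in range(len(m)):
--         for kw, p in _KEYWORDS:
--             if p < best and m.startswith(kw, i):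
--                 best = p
--     return _LEVEL_NAMES[best]
-- ===== Notes on version B (the rewrite author's own statement) =====
-- stated objective: alternative
-- what changed: Single left-to-right scan over message positions keeping a minimum-priority accumulator, matching keywords positionally with startswith against a flat reduced keyword->priority table ('err'/'warn' subsume 'error'/'warning'), instead of an if/elif chain of four whole-string any(substring) searches.
import Mathlib
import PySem

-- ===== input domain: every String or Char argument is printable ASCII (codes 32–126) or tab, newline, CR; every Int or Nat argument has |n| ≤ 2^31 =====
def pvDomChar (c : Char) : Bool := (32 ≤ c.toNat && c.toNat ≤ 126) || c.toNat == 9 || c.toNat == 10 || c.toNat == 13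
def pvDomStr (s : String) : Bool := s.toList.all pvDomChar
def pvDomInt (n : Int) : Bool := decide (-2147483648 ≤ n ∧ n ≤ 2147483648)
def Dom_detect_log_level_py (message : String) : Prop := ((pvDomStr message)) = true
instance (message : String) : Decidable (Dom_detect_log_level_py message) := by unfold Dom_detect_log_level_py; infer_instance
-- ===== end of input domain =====

-- B replaces the if/elif chain of whole-string substring searches by one left-to-right scan over
-- message positions keeping a minimum-priority accumulator, matching positionally (startswith)
-- against a flat reduced keyword table (alternative decomposition; same asymptotic cost).

-- ===== PORT A =====
def detect_log_level_py (message : String) : String :=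
  let msg_lower := PySem.Str.lower message
  if (["critical", "fatal", "emergency", "panic"] : List String).any
      (fun keyword => PySem.Str.isIn keyword msg_lower) then "CRITICAL"
  else if (["error", "err", "failed", "failure"] : List String).any
      (fun keyword => PySem.Str.isIn keyword msg_lower) then "ERROR"
  else if (["warn", "warning", "caution"] : List String).any
      (fun keyword => PySem.Str.isIn keyword msg_lower) then "WARNING"
  else if (["debug", "dbg"] : List String).any
      (fun keyword => PySem.Str.isIn keyword msg_lower) then "DEBUG"
  else "INFO"

-- ===== PORT B =====
def pvKeywords : List (List Char × Nat) :=
  [("critical".toList, 0), ("fatal".toList, 0), ("emergency".toList, 0), ("panic".toList, 0),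
   ("err".toList, 1), ("failed".toList, 1), ("failure".toList, 1),
   ("warn".toList, 2), ("caution".toList, 2),
   ("debug".toList, 3), ("dbg".toList, 3)]

def pvLevelNames : List String := ["CRITICAL", "ERROR", "WARNING", "DEBUG", "INFO"]

-- Source B's nested 'for i in range(len(m)) / for kw, p in _KEYWORDS' loops; m.startswith(kw, i)
-- with 0 ≤ i ≤ len(m) is exactly PySem.Chars.startswith (m.drop i) kw
def pvBest (m : List Char) : Nat :=
  (List.range m.length).foldl
    (fun best i =>
      pvKeywords.foldl
        (fun best k =>
          if k.2 < best ∧ PySem.Chars.startswith (m.drop i) k.1 = true then k.2 else best)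
        best)
    4

def detect_log_level_py_alt (message : String) : String :=
  pvLevelNames.getD (pvBest (PySem.Str.lower message).toList) "INFO"

-- ===== PRECONDITION & SPEC =====
def Spec_detect_log_level_py (message : String) (out : String) : Prop := out = detect_log_level_py_alt message
instance (message : String) (out : String) : Decidable (Spec_detect_log_level_py message out) := by unfold Spec_detect_log_level_py; infer_instance

-- ===== CLAIM (what is proved, stated in full; the proofs are below) =====
def Claim_equal_detect_log_level_py : Prop := ∀ (message : String), Dom_detect_log_level_py message → Spec_detect_log_level_py message (detect_log_level_py message)

-- ===== LEMMAS AND PROOFS =====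

-- the inner fold over the keyword table never increases the accumulator
theorem pv_inner_le (m : List Char) (i : Nat) (l : List (List Char × Nat)) (b : Nat) :
    l.foldl (fun best k =>
        if k.2 < best ∧ PySem.Chars.startswith (m.drop i) k.1 = true then k.2 else best) b ≤ b := by
  induction l generalizing b with
  | nil => simp
  | cons a l ih =>
    simp only [List.foldl_cons]
    split_ifs with h
    · exact le_trans (ih _) (le_of_lt h.1)
    · exact ih b

-- a matching keyword bounds the inner fold's result
theorem pv_inner_le_of_mem (m : List Char) (i : Nat) (kw : List Char × Nat)
    (hsw : PySem.Chars.startswith (m.drop i) kw.1 = true) :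
    ∀ (l : List (List Char × Nat)) (b : Nat), kw ∈ l →
      l.foldl (fun best k =>
          if k.2 < best ∧ PySem.Chars.startswith (m.drop i) k.1 = true then k.2 else best) b ≤ kw.2 := by
  intro l
  induction l with
  | nil => intro b h; cases h
  | cons a l ih =>
    intro b hmem
    simp only [List.foldl_cons]
    rcases List.mem_cons.1 hmem with h | h
    · subst h
      split_ifs with hc
      · exact pv_inner_le m i l _
      · have hb : ¬ kw.2 < b := fun hlt => hc ⟨hlt, hsw⟩
        exact le_trans (pv_inner_le m i l b) (by omega)
    · split_ifs with hc
      · exact le_trans (ih _ h) le_rfl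
      · exact ih _ h

-- the inner fold either keeps its input or returns the priority of some matching keyword
theorem pv_inner_cases (m : List Char) (i : Nat) :
    ∀ (l : List (List Char × Nat)) (b : Nat),
      l.foldl (fun best k =>
          if k.2 < best ∧ PySem.Chars.startswith (m.drop i) k.1 = true then k.2 else best) b = b ∨
      ∃ kw ∈ l, PySem.Chars.startswith (m.drop i) kw.1 = true ∧
        l.foldl (fun best k =>
          if k.2 < best ∧ PySem.Chars.startswith (m.drop i) k.1 = true then k.2 else best) b = kw.2 := by
  intro l
  induction l with
  | nil => intro b; left; rfl
  | cons a l ih =>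
    intro b
    simp only [List.foldl_cons]
    split_ifs with hc
    · rcases ih a.2 with h | ⟨kw, hkw, hsw, he⟩
      · right; exact ⟨a, by simp, hc.2, h⟩
      · right; exact ⟨kw, by simp [hkw], hsw, he⟩
    · rcases ih b with h | ⟨kw, hkw, hsw, he⟩
      · left; exact h
      · right; exact ⟨kw, by simp [hkw], hsw, he⟩

-- the outer fold over positions never increases the accumulator
theorem pv_outer_le (m : List Char) :
    ∀ (l : List Nat) (b : Nat),
      l.foldl (fun best i =>
        pvKeywords.foldl (fun best k =>
          if k.2 < best ∧ PySem.Chars.startswith (m.drop i) k.1 = true then k.2 else best) best) b ≤ b := by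
  intro l
  induction l with
  | nil => intro b; simp
  | cons a l ih =>
    intro b
    simp only [List.foldl_cons]
    exact le_trans (ih _) (pv_inner_le m a pvKeywords b)

-- a keyword matching at some scanned position bounds the outer fold's result
theorem pv_outer_le_of (m : List Char) (i : Nat) (kw : List Char × Nat)
    (hkw : kw ∈ pvKeywords) (hsw : PySem.Chars.startswith (m.drop i) kw.1 = true) :
    ∀ (l : List Nat) (b : Nat), i ∈ l →
      l.foldl (fun best i =>
        pvKeywords.foldl (fun best k =>
          if k.2 < best ∧ PySem.Chars.startswith (m.drop i) k.1 = true then k.2 else best) best) b ≤ kw.2 := by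
  intro l
  induction l with
  | nil => intro b h; cases h
  | cons a l ih =>
    intro b hmem
    simp only [List.foldl_cons]
    rcases List.mem_cons.1 hmem with h | h
    · subst h
      exact le_trans (pv_outer_le m l _) (pv_inner_le_of_mem m i kw hsw pvKeywords b hkw)
    · exact ih _ h

-- the outer fold either keeps its input or returns the priority of a keyword matching somewhere
theorem pv_outer_cases (m : List Char) :
    ∀ (l : List Nat) (b : Nat),
      l.foldl (fun best i =>
        pvKeywords.foldl (fun best k =>
          if k.2 < best ∧ PySem.Chars.startswith (m.drop i) k.1 = true then k.2 else best) best) b = b ∨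
      ∃ i ∈ l, ∃ kw ∈ pvKeywords, PySem.Chars.startswith (m.drop i) kw.1 = true ∧
        l.foldl (fun best i =>
          pvKeywords.foldl (fun best k =>
            if k.2 < best ∧ PySem.Chars.startswith (m.drop i) k.1 = true then k.2 else best) best) b = kw.2 := by
  intro l
  induction l with
  | nil => intro b; left; rfl
  | cons a l ih =>
    intro b
    simp only [List.foldl_cons]
    rcases pv_inner_cases m a pvKeywords b with h | ⟨kw, hkw, hsw, he⟩
    · rw [h]
      rcases ih b with h2 | ⟨i, hi, kw, hkw, hsw, he⟩
      · left; exact h2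
      · right; exact ⟨i, by simp [hi], kw, hkw, hsw, he⟩
    · rcases ih _ with h2 | ⟨i, hi, kw', hkw', hsw', he'⟩
      · right; exact ⟨a, by simp, kw, hkw, hsw, by rw [h2, he]⟩
      · right; exact ⟨i, by simp [hi], kw', hkw', hsw', he'⟩

-- some keyword of priority p occurs in m (positionally)
def pvHit (m : List Char) (p : Nat) : Prop :=
  ∃ i < m.length, ∃ kw ∈ pvKeywords, kw.2 = p ∧ PySem.Chars.startswith (m.drop i) kw.1 = true

theorem pvBest_le (m : List Char) (p : Nat) (h : pvHit m p) : pvBest m ≤ p := by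
  obtain ⟨i, hi, kw, hkw, hp, hsw⟩ := h
  subst hp
  exact pv_outer_le_of m i kw hkw hsw (List.range m.length) 4 (List.mem_range.2 hi)

theorem pvBest_cases (m : List Char) : pvBest m = 4 ∨ pvHit m (pvBest m) := by
  rcases pv_outer_cases m (List.range m.length) 4 with h | ⟨i, hi, kw, hkw, hsw, he⟩
  · left; exact h
  · right; exact ⟨i, List.mem_range.1 hi, kw, hkw, he.symm, hsw⟩

theorem pv_hit_lt (m : List Char) (p : Nat) (h : pvHit m p) : p < 4 := by
  obtain ⟨i, _, kw, hkw, hp, _⟩ := h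
  have hall : ∀ k ∈ pvKeywords, k.2 < 4 := by decide
  have := hall kw hkw
  omega

-- positional hits are exactly substring containment
theorem pv_hit_iff (m : List Char) (p : Nat) :
    pvHit m p ↔ ∃ kw ∈ pvKeywords, kw.2 = p ∧ PySem.Chars.isIn kw.1 m = true := by
  constructor
  · rintro ⟨i, _, kw, hkw, hp, hsw⟩
    exact ⟨kw, hkw, hp,
      (PySem.Chars.exists_prefix_drop_iff_isIn _ _).1 ⟨i, (PySem.Chars.startswith_iff _ _).1 hsw⟩⟩
  · rintro ⟨kw, hkw, hp, hin⟩
    obtain ⟨j, hpre⟩ := (PySem.Chars.exists_prefix_drop_iff_isIn _ _).2 hin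
    have hne : kw.1 ≠ [] := by
      have hall : ∀ k ∈ pvKeywords, k.1 ≠ [] := by decide
      exact hall kw hkw
    by_cases hj : j < m.length
    · exact ⟨j, hj, kw, hkw, hp, (PySem.Chars.startswith_iff _ _).2 hpre⟩
    · exfalso
      rw [List.drop_eq_nil_of_le (le_of_not_gt hj)] at hpre
      exact hne (List.prefix_nil.1 hpre)

theorem pv_err_sub (m : List Char) (h : PySem.Chars.isIn "error".toList m = true) :
    PySem.Chars.isIn "err".toList m = true := by
  rw [PySem.Chars.isIn_iff_infix] at h ⊢
  exact List.IsInfix.trans (by decide : ("err".toList <:+: "error".toList)) h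

theorem pv_warn_sub (m : List Char) (h : PySem.Chars.isIn "warning".toList m = true) :
    PySem.Chars.isIn "warn".toList m = true := by
  rw [PySem.Chars.isIn_iff_infix] at h ⊢
  exact List.IsInfix.trans (by decide : ("warn".toList <:+: "warning".toList)) h

theorem pv_hit0_iff (m : List Char) :
    pvHit m 0 ↔ (PySem.Chars.isIn "critical".toList m || (PySem.Chars.isIn "fatal".toList m ||
      (PySem.Chars.isIn "emergency".toList m || PySem.Chars.isIn "panic".toList m))) = true := by
  rw [pv_hit_iff]
  constructor
  · rintro ⟨kw, hkw, hp, hin⟩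
    simp only [pvKeywords, List.mem_cons, List.not_mem_nil, or_false] at hkw
    rcases hkw with rfl | rfl | rfl | rfl | rfl | rfl | rfl | rfl | rfl | rfl | rfl <;> simp_all
  · intro h
    simp only [Bool.or_eq_true] at h
    rcases h with h | h | h | h
    · exact ⟨("critical".toList, 0), by simp [pvKeywords], rfl, h⟩
    · exact ⟨("fatal".toList, 0), by simp [pvKeywords], rfl, h⟩
    · exact ⟨("emergency".toList, 0), by simp [pvKeywords], rfl, h⟩
    · exact ⟨("panic".toList, 0), by simp [pvKeywords], rfl, h⟩

theorem pv_hit1_iff (m : List Char) :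
    pvHit m 1 ↔ (PySem.Chars.isIn "error".toList m || (PySem.Chars.isIn "err".toList m ||
      (PySem.Chars.isIn "failed".toList m || PySem.Chars.isIn "failure".toList m))) = true := by
  rw [pv_hit_iff]
  constructor
  · rintro ⟨kw, hkw, hp, hin⟩
    simp only [pvKeywords, List.mem_cons, List.not_mem_nil, or_false] at hkw
    rcases hkw with rfl | rfl | rfl | rfl | rfl | rfl | rfl | rfl | rfl | rfl | rfl <;> simp_all
  · intro h
    simp only [Bool.or_eq_true] at h
    rcases h with h | h | h | h
    · exact ⟨("err".toList, 1), by simp [pvKeywords], rfl, pv_err_sub m h⟩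
    · exact ⟨("err".toList, 1), by simp [pvKeywords], rfl, h⟩
    · exact ⟨("failed".toList, 1), by simp [pvKeywords], rfl, h⟩
    · exact ⟨("failure".toList, 1), by simp [pvKeywords], rfl, h⟩

theorem pv_hit2_iff (m : List Char) :
    pvHit m 2 ↔ (PySem.Chars.isIn "warn".toList m || (PySem.Chars.isIn "warning".toList m ||
      PySem.Chars.isIn "caution".toList m)) = true := by
  rw [pv_hit_iff]
  constructor
  · rintro ⟨kw, hkw, hp, hin⟩
    simp only [pvKeywords, List.mem_cons, List.not_mem_nil, or_false] at hkw
    rcases hkw with rfl | rfl | rfl | rfl | rfl | rfl | rfl | rfl | rfl | rfl | rfl <;> simp_all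
  · intro h
    simp only [Bool.or_eq_true] at h
    rcases h with h | h | h
    · exact ⟨("warn".toList, 2), by simp [pvKeywords], rfl, h⟩
    · exact ⟨("warn".toList, 2), by simp [pvKeywords], rfl, pv_warn_sub m h⟩
    · exact ⟨("caution".toList, 2), by simp [pvKeywords], rfl, h⟩

theorem pv_hit3_iff (m : List Char) :
    pvHit m 3 ↔ (PySem.Chars.isIn "debug".toList m || PySem.Chars.isIn "dbg".toList m) = true := by
  rw [pv_hit_iff]
  constructor
  · rintro ⟨kw, hkw, hp, hin⟩
    simp only [pvKeywords, List.mem_cons, List.not_mem_nil, or_false] at hkw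
    rcases hkw with rfl | rfl | rfl | rfl | rfl | rfl | rfl | rfl | rfl | rfl | rfl <;> simp_all
  · intro h
    simp only [Bool.or_eq_true] at h
    rcases h with h | h
    · exact ⟨("debug".toList, 3), by simp [pvKeywords], rfl, h⟩
    · exact ⟨("dbg".toList, 3), by simp [pvKeywords], rfl, h⟩

theorem pvBest_eq (m : List Char) (p : Nat) (h : pvHit m p) (hlow : ∀ q < p, ¬ pvHit m q) :
    pvBest m = p := by
  have h1 := pvBest_le m p h
  rcases pvBest_cases m with h4 | hh
  · have := pv_hit_lt m p h; omega
  · by_contra hne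
    exact hlow (pvBest m) (lt_of_le_of_ne h1 hne) hh

theorem pvBest_eq_four (m : List Char) (h : ∀ q < 4, ¬ pvHit m q) : pvBest m = 4 := by
  rcases pvBest_cases m with h4 | hh
  · exact h4
  · exact absurd hh (h _ (pv_hit_lt m _ hh))

-- ===== VERDICT (by name: the statement is the Claim_ definition above) =====
theorem detect_log_level_py_spec : Claim_equal_detect_log_level_py := by
  intro message _
  unfold Spec_detect_log_level_py detect_log_level_py detect_log_level_py_alt
  simp only [List.any_cons, List.any_nil, Bool.or_false, PySem.Str.isIn_eq]
  set m := (PySem.Str.lower message).toList with hm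
  by_cases h0 : pvHit m 0
  · have hb : pvBest m = 0 := pvBest_eq m 0 h0 (by omega)
    rw [if_pos ((pv_hit0_iff m).1 h0), hb]
    rfl
  · rw [if_neg (fun hc => h0 ((pv_hit0_iff m).2 hc))]
    by_cases h1 : pvHit m 1
    · have hb : pvBest m = 1 := pvBest_eq m 1 h1 (by intro q hq; interval_cases q; exact h0)
      rw [if_pos ((pv_hit1_iff m).1 h1), hb]
      rfl
    · rw [if_neg (fun hc => h1 ((pv_hit1_iff m).2 hc))]
      by_cases h2 : pvHit m 2
      · have hb : pvBest m = 2 := by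
          refine pvBest_eq m 2 h2 ?_
          intro q hq; interval_cases q
          · exact h0
          · exact h1
        rw [if_pos ((pv_hit2_iff m).1 h2), hb]
        rfl
      · rw [if_neg (fun hc => h2 ((pv_hit2_iff m).2 hc))]
        by_cases h3 : pvHit m 3
        · have hb : pvBest m = 3 := by
            refine pvBest_eq m 3 h3 ?_
            intro q hq; interval_cases q
            · exact h0
            · exact h1
            · exact h2
          rw [if_pos ((pv_hit3_iff m).1 h3), hb]
          rfl
        · rw [if_neg (fun hc => h3 ((pv_hit3_iff m).2 hc))]
          have hb : pvBest m = 4 := by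
            refine pvBest_eq_four m ?_
            intro q hq; interval_cases q
            · exact h0
            · exact h1
            · exact h2
            · exact h3
          rw [hb]
          rfl
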